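-- pv_equiv track=rewrite | github.com/thehalleyyoung/deppy | deppy/tools/proof_repl.py | parse
-- ===== SOURCE A (Python) =====
-- def parse(line: str) -> tuple[str, list[str]]:
--     """Parse a command line into (command, args).
--
--     Handles quoted arguments so ``goal "x + 0 == x"`` parses correctly.
--     """
--     line = line.strip()
--     if not line:
--         return ("", [])
--
--     # Tokenize respecting quotes
--     tokens: list[str] = []
--     current = ""
--     in_quote: str | None = None
--     for ch in line:
--         if in_quote:
--             if ch == in_quote:
--                 in_quote = None
--             else:
--                 current += ch
--         elif ch in ('"', "'"):
--             in_quote = ch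
--         elif ch == " ":
--             if current:
--                 tokens.append(current)
--                 current = ""
--         else:
--             current += ch
--     if current:
--         tokens.append(current)
--
--     if not tokens:
--         return ("", [])
--     return (tokens[0].lower(), tokens[1:])
-- ===== SOURCE B (Python) =====
-- def parse(line: str) -> tuple[str, list[str]]:
--     """Parse a command line into (command, args).
--
--     Quote-jump scanner: instead of a per-character in_quote flag, each
--     quoted span is consumed in one step by jumping to the matching quote
--     (an unclosed quote takes the rest of the string).  The token being
--     built is kept as a list of chunks joined at flush time.
--     """
--     line = line.strip()
--     tokens: list[str] = []
--     parts: list[str] = []  # chunks of the token being built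
--     i = 0
--     n = len(line)
--     while i < n:
--         ch = line[i]
--         if ch in ('"', "'"):
--             j = line.find(ch, i + 1)
--             if j == -1:
--                 parts.append(line[i + 1:])
--                 i = n
--             else:
--                 parts.append(line[i + 1:j])
--                 i = j + 1
--         elif ch == " ":
--             current = "".join(parts)
--             if current:
--                 tokens.append(current)
--             parts = []
--             i += 1
--         else:
--             parts.append(ch)
--             i += 1
--     current = "".join(parts)
--     if current:
--         tokens.append(current)
--
--     if not tokens:
--         return ("", [])
--     return (tokens[0].lower(), tokens[1:])
-- ===== Notes on version B (the rewrite author's own statement) =====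
-- stated objective: alternative
-- what changed: Replaces A's per-character state machine with an in_quote flag by an index-based quote-jump scanner that consumes each quoted span in one find+slice step (an unclosed quote takes the rest) and builds tokens as joined chunks, dropping the flag and the early empty-line return.
import Mathlib
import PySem

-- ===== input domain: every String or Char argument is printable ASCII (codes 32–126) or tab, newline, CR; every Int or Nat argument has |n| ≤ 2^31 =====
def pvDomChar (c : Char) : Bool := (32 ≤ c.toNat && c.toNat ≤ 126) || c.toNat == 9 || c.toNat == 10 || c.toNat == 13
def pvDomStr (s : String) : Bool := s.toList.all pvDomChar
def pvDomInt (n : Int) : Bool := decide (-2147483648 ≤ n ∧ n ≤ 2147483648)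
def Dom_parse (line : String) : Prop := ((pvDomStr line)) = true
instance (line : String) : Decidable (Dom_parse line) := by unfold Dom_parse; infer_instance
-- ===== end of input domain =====

-- B replaces A's per-character in_quote state machine by a quote-jump scanner
-- (each quoted span is consumed in one find+slice step); objective: alternative decomposition.

-- ===== PORT A =====
-- one step of A's for-loop; state = (tokens, current, in_quote)
def parseStepA (st : List (List Char) × List Char × Option Char) (ch : Char) :
    List (List Char) × List Char × Option Char :=
  match st with
  | (tokens, current, some q) =>
      if ch = q then (tokens, current, none) else (tokens, current ++ [ch], some q)
  | (tokens, current, none) =>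
      if ch = '"' ∨ ch = '\'' then (tokens, current, some ch)
      else if ch = ' ' then
        (if current ≠ [] then (tokens ++ [current], [], none) else (tokens, current, none))
      else (tokens, current ++ [ch], none)

def parse (line : String) : String × List String :=
  let l := (PySem.Str.strip line).toList
  if l = [] then ("", [])
  else
    let st := l.foldl parseStepA ([], [], none)
    let tokens := if st.2.1 ≠ [] then st.1 ++ [st.2.1] else st.1
    match tokens with
    | [] => ("", [])
    | t :: ts => (String.ofList (PySem.Chars.lower t), ts.map String.ofList)

-- ===== PORT B =====
-- B's scanner over line[i:]: on a quote, line.find(ch, i+1) / the slices line[i+1:j], line[i+1:]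
-- are takeWhile/dropWhile at the first matching quote of the tail (absent quote: the whole tail,
-- empty remainder — exact).  B's chunk list `parts` is this buffer `current` (its join, flattened).
def parseAltLoop (rest : List Char) (tokens : List (List Char)) (current : List Char) :
    List (List Char) × List Char :=
  match rest with
  | [] => (tokens, current)
  | ch :: tl =>
    if ch = '"' ∨ ch = '\'' then
      parseAltLoop ((tl.dropWhile (· ≠ ch)).drop 1) tokens (current ++ tl.takeWhile (· ≠ ch))
    else if ch = ' ' then
      if current ≠ [] then parseAltLoop tl (tokens ++ [current]) []
      else parseAltLoop tl tokens current
    else parseAltLoop tl tokens (current ++ [ch])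
termination_by rest.length
decreasing_by
  · have := List.length_dropWhile_le (fun c => decide (c ≠ ch)) tl
    simp only [List.length_drop, List.length_cons]; omega
  all_goals simp

def parse_alt (line : String) : String × List String :=
  let l := (PySem.Str.strip line).toList
  let st := parseAltLoop l [] []
  let tokens := if st.2 ≠ [] then st.1 ++ [st.2] else st.1
  match tokens with
  | [] => ("", [])
  | t :: ts => (String.ofList (PySem.Chars.lower t), ts.map String.ofList)

-- ===== PRECONDITION & SPEC =====
def Spec_parse (line : String) (out : String × List String) : Prop := out = parse_alt line
instance (line : String) (out : String × List String) : Decidable (Spec_parse line out) := by unfold Spec_parse; infer_instance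

-- ===== CLAIM (what is proved, stated in full; the proofs are below) =====
def Claim_equal_parse : Prop := ∀ (line : String), Dom_parse line → Spec_parse line (parse line)

-- ===== LEMMAS AND PROOFS =====

-- projection dropping A's in_quote flag
def projA (st : List (List Char) × List Char × Option Char) : List (List Char) × List Char :=
  (st.1, st.2.1)

-- A's fold from an open-quote state: the span up to the matching quote joins current,
-- then the fold resumes in the unquoted state after it.
theorem foldA_quote (cs : List Char) (q : Char) (tokens : List (List Char)) (current : List Char) :
    projA (cs.foldl parseStepA (tokens, current, some q)) =
    projA (((cs.dropWhile (· ≠ q)).drop 1).foldl parseStepA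
            (tokens, current ++ cs.takeWhile (· ≠ q), none)) := by
  induction cs generalizing current with
  | nil => simp [projA]
  | cons c tl ih =>
    by_cases hc : c = q
    · subst hc
      simp [parseStepA, List.dropWhile, List.takeWhile]
    · rw [List.foldl_cons,
        show parseStepA (tokens, current, some q) c = (tokens, current ++ [c], some q) by
          simp [parseStepA, hc],
        ih (current ++ [c])]
      simp [hc]

-- the two loops compute the same (tokens, current) pair
theorem foldA_eq_altLoop (cs : List Char) (tokens : List (List Char)) (current : List Char) :
    projA (cs.foldl parseStepA (tokens, current, none)) = parseAltLoop cs tokens current := by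
  induction cs, tokens, current using parseAltLoop.induct with
  | case1 tokens current => simp [parseAltLoop, projA]
  | case2 tokens current ch tl hq ih =>
    rw [List.foldl_cons,
      show parseStepA (tokens, current, none) ch = (tokens, current, some ch) by
        rcases hq with h | h <;> simp [parseStepA, h],
      foldA_quote, ih]
    rw [parseAltLoop]
    simp [hq]
  | case3 tokens current tl hcur hq ih =>
    rw [List.foldl_cons,
      show parseStepA (tokens, current, none) ' ' = (tokens ++ [current], [], none) by
        simp [parseStepA, hcur],
      ih]
    rw [parseAltLoop]
    simp [hcur]
  | case4 tokens current tl hcur hq ih =>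
    rw [List.foldl_cons,
      show parseStepA (tokens, current, none) ' ' = (tokens, current, none) by
        simp [parseStepA, hcur],
      ih]
    rw [parseAltLoop]
    simp [hcur]
  | case5 tokens current ch tl hq hsp ih =>
    rw [List.foldl_cons,
      show parseStepA (tokens, current, none) ch = (tokens, current ++ [ch], none) by
        simp [parseStepA, hq, hsp],
      ih]
    rw [parseAltLoop]
    simp [hq, hsp]

-- ===== VERDICT (by name: the statement is the Claim_ definition above) =====
theorem parse_spec : Claim_equal_parse := by
  intro line _
  show parse line = parse_alt line
  unfold parse parse_alt
  by_cases h : (PySem.Str.strip line).toList = []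
  · simp [h, parseAltLoop]
  · simp only [if_neg h]
    have := foldA_eq_altLoop ((PySem.Str.strip line).toList) [] []
    unfold projA at this
    rw [show ((PySem.Str.strip line).toList.foldl parseStepA ([], [], none)).2.1
          = (parseAltLoop (PySem.Str.strip line).toList [] []).2 by rw [← this]]
    rw [show ((PySem.Str.strip line).toList.foldl parseStepA ([], [], none)).1
          = (parseAltLoop (PySem.Str.strip line).toList [] []).1 by rw [← this]]
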